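-- pv_equiv track=rewrite | github.com/coldbeeen/cote_study | competition/2025_네이버_1_seulbeen.py | solution
-- ===== SOURCE A (Python) =====
-- def solution(cylinder,a):
--     result=[]
--     mo=0
--     ja=0
--     n=len(cylinder)
--     no_bullet=list(filter(lambda x: cylinder[x]==0,range(len(cylinder))))
--     for idx in no_bullet:
--         cnt=0
--         flag=0
--         while cnt<a:
--             idx=(idx+1)%n
--             cnt+=1
--             if cylinder[idx]==1:
--                 flag=1
--                 break
--         if flag:
--             mo+=1
--         else:
--             mo+=1
--             ja+=1
--     for i in range(min(mo,ja),1,-1):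
--         if mo%i==0 and ja%i==0:
--             mo//=i
--             ja//=i
--             break
--     result.append(ja)
--     result.append(mo)
--
--
--
--     return result
-- ===== SOURCE B (Python) =====
-- def solution(cylinder, a):
--     n = len(cylinder)
--     m = min(a, n)
--     # distance from each chamber to the next loaded chamber (cyclically),
--     # via two backward sweeps; sentinel 2*n means "no bullet anywhere"
--     d = 2 * n
--     for i in range(n - 1, -1, -1):
--         d = 0 if cylinder[i] == 1 else d + 1
--     dist_rev = []
--     for i in range(n - 1, -1, -1):
--         d = 0 if cylinder[i] == 1 else d + 1
--         dist_rev.append(d)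
--     mo = 0
--     ja = 0
--     for i in range(n):
--         if cylinder[i] == 0:
--             mo += 1
--             if dist_rev[n - 1 - i] > m:
--                 ja += 1
--     # reduce the ratio ja/mo with Euclid's gcd
--     x, y = mo, ja
--     while y:
--         x, y = y, x % y
--     if ja > 0:
--         mo //= x
--         ja //= x
--     return [ja, mo]
-- ===== Notes on version B (the rewrite author's own statement) =====
-- stated objective: alternative
-- what changed: B precomputes each chamber's cyclic distance to the next loaded chamber with two backward sweeps instead of simulating up to a steps per empty chamber, and reduces the ratio with Euclid's gcd instead of a descending divisor search; this removes A's O(a) inner simulation loop, though on typical dense inputs both are linear and B was not measured faster.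
import Mathlib
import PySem

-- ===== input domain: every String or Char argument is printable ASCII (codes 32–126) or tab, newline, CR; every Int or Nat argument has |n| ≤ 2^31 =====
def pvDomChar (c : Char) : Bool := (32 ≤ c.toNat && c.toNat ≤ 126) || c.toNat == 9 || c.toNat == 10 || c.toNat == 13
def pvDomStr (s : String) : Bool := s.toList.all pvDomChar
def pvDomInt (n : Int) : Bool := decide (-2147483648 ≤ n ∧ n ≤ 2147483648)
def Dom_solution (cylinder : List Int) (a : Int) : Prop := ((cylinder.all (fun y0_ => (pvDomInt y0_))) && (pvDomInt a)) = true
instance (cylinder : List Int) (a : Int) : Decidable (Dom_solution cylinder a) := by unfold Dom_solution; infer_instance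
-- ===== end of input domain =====

-- B replaces A's per-chamber spin simulation by a two-sweep next-bullet-distance
-- precomputation and A's descending divisor search by Euclid's gcd (objective: alternative).


-- ===== PORT A =====
-- the inner 'while cnt<a' loop; true = flag (a bullet found within a steps)
def awhile (cylinder : List Int) (n a : Int) (idx cnt : Int) : Bool :=
  if cnt < a then
    let idx' := PySem.Int.mod (idx + 1) n
    if PySem.List.pyGetD cylinder idx' 0 == 1 then true
    else awhile cylinder n a idx' (cnt + 1)
  else false
termination_by (a - cnt).toNat
decreasing_by omega

-- 'for i in range(min(mo,ja),1,-1): …; break'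
def areduce (mo ja : Int) : List Int → Int × Int
  | [] => (mo, ja)
  | i :: rest =>
    if PySem.Int.mod mo i == 0 && PySem.Int.mod ja i == 0 then
      (PySem.Int.floordiv mo i, PySem.Int.floordiv ja i)
    else areduce mo ja rest

def solution (cylinder : List Int) (a : Int) : List Int :=
  let n : Int := cylinder.length
  let no_bullet := (PySem.List.pyRange 0 n 1).filter
      (fun x => PySem.List.pyGetD cylinder x 0 == 0)
  let p := no_bullet.foldl (fun (p : Int × Int) idx =>
      if awhile cylinder n a idx 0 then (p.1 + 1, p.2) else (p.1 + 1, p.2 + 1)) (0, 0)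
  let r := areduce p.1 p.2 (PySem.List.pyRange (min p.1 p.2) 1 (-1))
  [r.2, r.1]

-- ===== PORT B =====
-- termination fact for the Euclid loop (cited by bgcd's decreasing_by)
theorem pv_mod_natAbs_lt (x y : Int) (h : ¬ y = 0) :
    (PySem.Int.mod x y).natAbs < y.natAbs := by
  rcases lt_or_gt_of_ne h with hy | hy
  · have h1 := PySem.Int.mod_neg_bounds x hy
    omega
  · have h1 := PySem.Int.mod_nonneg x hy
    have h2 := PySem.Int.mod_lt x hy
    omega

-- 'while y: x, y = y, x % y'
def bgcd (x y : Int) : Int :=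
  if h : y = 0 then x else bgcd y (PySem.Int.mod x y)
termination_by y.natAbs
decreasing_by exact pv_mod_natAbs_lt x y h

def solution_alt (cylinder : List Int) (a : Int) : List Int :=
  let n : Int := cylinder.length
  let m := min a n
  let step := fun (d : Int) (i : Int) =>
    if PySem.List.pyGetD cylinder i 0 == 1 then 0 else d + 1
  -- first backward sweep over the cycle (wrap-around distances)
  let d1 := (PySem.List.pyRange (n - 1) (-1) (-1)).foldl step (2 * n)
  -- second backward sweep, recording the distances (in reversed position order)
  let p := (PySem.List.pyRange (n - 1) (-1) (-1)).foldl
      (fun (p : Int × List Int) i =>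
        let d' := step p.1 i
        (d', p.2 ++ [d'])) (d1, [])
  let distRev := p.2
  -- count empty chambers (mo) and safe empty chambers (ja)
  let q := (PySem.List.pyRange 0 n 1).foldl
      (fun (q : Int × Int) i =>
        if PySem.List.pyGetD cylinder i 0 == 0 then
          (q.1 + 1,
           if PySem.List.pyGetD distRev (n - 1 - i) 0 > m then q.2 + 1 else q.2)
        else q) (0, 0)
  let x := bgcd q.1 q.2
  let r := if q.2 > 0 then (PySem.Int.floordiv q.1 x, PySem.Int.floordiv q.2 x)
           else (q.1, q.2)
  [r.2, r.1]

-- ===== PRECONDITION & SPEC =====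
def Spec_solution (cylinder : List Int) (a : Int) (out : List Int) : Prop := out = solution_alt cylinder a
instance (cylinder : List Int) (a : Int) (out : List Int) : Decidable (Spec_solution cylinder a out) := by unfold Spec_solution; infer_instance

-- ===== CLAIM (what is proved, stated in full; the proofs are below) =====
def Claim_equal_solution : Prop := ∀ (cylinder : List Int) (a : Int), Dom_solution cylinder a → Spec_solution cylinder a (solution cylinder a)

-- ===== LEMMAS AND PROOFS =====

-- chamber j is loaded
def pvBullet (cyl : List Int) (j : Nat) : Prop := cyl.getD j 0 = 1

-- proof-side backward sweep over physical indices s, s-1, …, s-t+1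
def sweepD (cyl : List Int) : Nat → Nat → Int → Int
  | _, 0, d => d
  | s, t+1, d => sweepD cyl (s - 1) t (if cyl.getD s 0 == 1 then 0 else d + 1)

-- A's while-loop raises the flag iff a bullet lies within a steps
theorem awhile_iff (cyl : List Int) (n' : Nat) (hn : 0 < n') (a : Int) :
    ∀ (fuel : Nat) (j : Nat) (cnt : Int), j < n' → fuel = (a - cnt).toNat →
      (awhile cyl (n' : Int) a (j : Int) cnt = true ↔
        ∃ k : Nat, 1 ≤ k ∧ (cnt + k : Int) ≤ a ∧ pvBullet cyl ((j + k) % n')) := by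
  intro fuel
  induction fuel with
  | zero =>
    intro j cnt hj hf
    rw [awhile, if_neg (by omega)]
    simp only [Bool.false_eq_true, false_iff]
    rintro ⟨k, hk1, hk2, _⟩
    omega
  | succ fuel ih =>
    intro j cnt hj hf
    rw [awhile, if_pos (by omega)]
    have hmod : PySem.Int.mod ((j : Int) + 1) (n' : Int) = (((j + 1) % n' : Nat) : Int) := by
      rw [PySem.Int.mod_eq_emod_of_pos (by exact_mod_cast hn)]
      push_cast
      rfl
    simp only [hmod, PySem.List.pyGetD_natCast]
    by_cases hb : cyl.getD ((j + 1) % n') 0 == 1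
    · rw [if_pos hb]
      simp only [true_iff]
      exact ⟨1, le_refl 1, by push_cast; omega,
        by simpa [pvBullet] using beq_iff_eq.mp hb⟩
    · rw [if_neg hb]
      rw [ih ((j + 1) % n') (cnt + 1) (Nat.mod_lt _ hn) (by omega)]
      constructor
      · rintro ⟨k, hk1, hk2, hbk⟩
        refine ⟨k + 1, by omega, by push_cast at hk2 ⊢; omega, ?_⟩
        rwa [Nat.mod_add_mod, show j + 1 + k = j + (k + 1) by omega] at hbk
      · rintro ⟨k, hk1, hk2, hbk⟩
        match k, hk1 with
        | 1, _ =>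
          exfalso
          exact hb (beq_iff_eq.mpr hbk)
        | (k' + 2), _ =>
          refine ⟨k' + 1, by omega, by push_cast at hk2 ⊢; omega, ?_⟩
          rwa [Nat.mod_add_mod, show j + 1 + (k' + 1) = j + (k' + 2) by omega]

-- sweepD finds the nearest bullet at-or-after position s+1-t within [s+1-t, s], else adds t
theorem sweepD_char (cyl : List Int) : ∀ (t s : Nat) (d : Int), t ≤ s + 1 →
    ((∀ j, s + 1 - t ≤ j → j ≤ s → ¬ pvBullet cyl j) ∧ sweepD cyl s t d = d + t)
  ∨ (∃ j, s + 1 - t ≤ j ∧ j ≤ s ∧ pvBullet cyl j ∧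
      (∀ j', s + 1 - t ≤ j' → j' < j → ¬ pvBullet cyl j') ∧
      sweepD cyl s t d = (j : Int) - ((s + 1 - t : Nat) : Int)) := by
  intro t
  induction t with
  | zero =>
    intro s d _
    left
    constructor
    · intro j h1 h2; omega
    · simp [sweepD]
  | succ t ih =>
    intro s d ht
    have hts : t ≤ s := by omega
    rw [sweepD]
    by_cases hb : cyl.getD s 0 == 1
    · rw [if_pos hb]
      rcases ih (s - 1) 0 (by omega) with ⟨hnone, heq⟩ | ⟨j, hj1, hj2, hjb, hleast, heq⟩
      · right
        refine ⟨s, by omega, le_refl s, by simpa [pvBullet] using (beq_iff_eq.mp hb), ?_, ?_⟩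
        · intro j' h1 h2
          exact hnone j' (by omega) (by omega)
        · rw [heq]
          push_cast
          omega
      · right
        refine ⟨j, by omega, by omega, hjb, ?_, ?_⟩
        · intro j' h1 h2
          exact hleast j' (by omega) h2
        · rw [heq]
          push_cast
          omega
    · rw [if_neg hb]
      have hnb : ¬ pvBullet cyl s := by
        unfold pvBullet
        intro h
        exact hb (beq_iff_eq.mpr h)
      rcases ih (s - 1) (d + 1) (by omega) with ⟨hnone, heq⟩ | ⟨j, hj1, hj2, hjb, hleast, heq⟩
      · left
        constructor
        · intro j h1 h2
          by_cases hjs : j = s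
          · exact hjs ▸ hnb
          · exact hnone j (by omega) (by omega)
        · rw [heq]
          push_cast
          omega
      · right
        refine ⟨j, by omega, by omega, hjb, ?_, ?_⟩
        · intro j' h1 h2
          exact hleast j' (by omega) h2
        · rw [heq]
          push_cast
          omega

-- a bullet within a steps iff one within min(a, n) steps (period n)
theorem period_reduce (cyl : List Int) (n' : Nat) (hn : 0 < n') (a : Int)
    (i : Nat) (hi : i < n') (h0 : ¬ pvBullet cyl i) :
    (∃ k : Nat, 1 ≤ k ∧ (k : Int) ≤ a ∧ pvBullet cyl ((i + k) % n')) ↔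
    (∃ k : Nat, 1 ≤ k ∧ (k : Int) ≤ min a (n' : Int) ∧ pvBullet cyl ((i + k) % n')) := by
  constructor
  · rintro ⟨k, hk1, hk2, hbk⟩
    by_cases hkn : k ≤ n'
    · exact ⟨k, hk1, by omega, hbk⟩
    · refine ⟨k % n', ?_, ?_, ?_⟩
      · rcases Nat.eq_zero_or_pos (k % n') with h | h
        · exfalso
          have : (i + k) % n' = i := by
            rw [← Nat.add_mod_mod, h, Nat.add_zero, Nat.mod_eq_of_lt hi]
          exact h0 (this ▸ hbk)
        · omega
      · have h1 : k % n' < n' := Nat.mod_lt _ hn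
        push_cast
        omega
      · rwa [Nat.add_mod_mod]
  · rintro ⟨k, hk1, hk2, hbk⟩
    exact ⟨k, hk1, by omega, hbk⟩

-- the recorded distance at chamber i decides 'a bullet within min(a,n) steps'
theorem dist_iff (cyl : List Int) (n' : Nat) (hn : 0 < n') (a : Int)
    (i : Nat) (hi : i < n') (h0 : ¬ pvBullet cyl i) :
    (sweepD cyl (n' - 1) (n' - i) (sweepD cyl (n' - 1) n' (2 * n')) ≤ min a (n' : Int)) ↔
    (∃ k : Nat, 1 ≤ k ∧ (k : Int) ≤ min a (n' : Int) ∧ pvBullet cyl ((i + k) % n')) := by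
  have hmn : min a (n' : Int) ≤ (n' : Int) := min_le_right _ _
  have hw1 : n' - 1 + 1 - n' = 0 := by omega
  have hw2 : n' - 1 + 1 - (n' - i) = i := by omega
  rcases sweepD_char cyl n' (n' - 1) (2 * n') (by omega)
    with ⟨hnone1, heq1⟩ | ⟨j1, hj11, hj12, hjb1, hl1, heq1⟩
  · -- no bullet anywhere
    rcases sweepD_char cyl (n' - i) (n' - 1) (sweepD cyl (n' - 1) n' (2 * n')) (by omega)
      with ⟨_, heq2⟩ | ⟨j2, hj21, hj22, hjb2, _, _⟩
    · rw [heq2, heq1]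
      constructor
      · intro h
        exfalso
        push_cast at h
        omega
      · rintro ⟨k, _, _, hbk⟩
        have hjlt : (i + k) % n' < n' := Nat.mod_lt _ hn
        exact absurd hbk (hnone1 _ (by omega) (by omega))
    · exact absurd hjb2 (hnone1 j2 (by omega) (by omega))
  · rw [hw1] at hj11 hl1
    rcases sweepD_char cyl (n' - i) (n' - 1) (sweepD cyl (n' - 1) n' (2 * n')) (by omega)
      with ⟨hnone2, heq2⟩ | ⟨j2, hj21, hj22, hjb2, hl2, heq2⟩
    · -- no bullet in [i, n'-1]; nearest is j1 (< i), wrap-around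
      rw [hw2] at hnone2
      have hj1i : j1 < i := by
        by_contra hge
        exact hnone2 j1 (by omega) (by omega) hjb1
      rw [heq2, heq1]
      constructor
      · intro h
        refine ⟨j1 + n' - i, by omega, ?_, ?_⟩
        · push_cast at h ⊢
          omega
        · have : i + (j1 + n' - i) = j1 + n' := by omega
          rw [this, Nat.add_mod_right, Nat.mod_eq_of_lt (by omega)]
          exact hjb1
      · rintro ⟨k, hk1, hk2, hbk⟩
        have hjlt : (i + k) % n' < n' := Nat.mod_lt _ hn
        have hknn : k ≤ n' := by
          omega
        have hj'lt : (i + k) % n' < i := by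
          by_contra hge
          exact hnone2 _ (by omega) (by omega) hbk
        have hik : n' ≤ i + k := by
          by_contra hlt
          rw [Nat.mod_eq_of_lt (by omega)] at hj'lt hbk
          omega
        have hmodeq : (i + k) % n' = i + k - n' := by
          rw [Nat.mod_eq_sub_mod hik, Nat.mod_eq_of_lt (by omega)]
        have hle : j1 ≤ (i + k) % n' := by
          by_contra hlt
          exact hl1 _ (by omega) (by omega) hbk
        omega
    · -- least bullet j2 in [i, n'-1]
      rw [hw2] at hj21 hl2 heq2
      have hj2i : i < j2 := by
        rcases Nat.lt_or_ge i j2 with h | h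
        · exact h
        · have : j2 = i := by omega
          exact absurd (this ▸ hjb2) h0
      rw [heq2]
      constructor
      · intro h
        refine ⟨j2 - i, by omega, ?_, ?_⟩
        · push_cast at h ⊢
          omega
        · have : i + (j2 - i) = j2 := by omega
          rw [this, Nat.mod_eq_of_lt (by omega)]
          exact hjb2
      · rintro ⟨k, hk1, hk2, hbk⟩
        have hjlt : (i + k) % n' < n' := Nat.mod_lt _ hn
        have hknn : k ≤ n' := by omega
        rcases Nat.lt_or_ge ((i + k) % n') i with hlt | hge
        · have hik : n' ≤ i + k := by
            by_contra hx
            rw [Nat.mod_eq_of_lt (by omega)] at hlt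
            omega
          omega
        · have hne : (i + k) % n' ≠ i := fun h => absurd (h ▸ hbk) h0
          have hj2le : j2 ≤ (i + k) % n' := by
            by_contra hx
            exact hl2 _ (by omega) (by omega) hbk
          have hmle : (i + k) % n' ≤ i + k := Nat.mod_le _ _
          omega

-- B's first pyRange sweep is sweepD
theorem foldl_sweep (cyl : List Int) :
    ∀ (t s : Nat) (d : Int), t ≤ s + 1 →
      ((List.range t).map (fun (k : Nat) => (s : Int) - (k : Int))).foldl
        (fun d i => if PySem.List.pyGetD cyl i 0 == 1 then 0 else d + 1) d
      = sweepD cyl s t d := by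
  intro t
  induction t with
  | zero => intro s d _; simp [sweepD]
  | succ t ih =>
    intro s d ht
    rw [List.range_succ_eq_map]
    simp only [List.map_cons, List.map_map, List.foldl_cons]
    have hmap : (List.range t).map ((fun (k : Nat) => (s : Int) - (k : Int)) ∘ Nat.succ)
        = (List.range t).map (fun (k : Nat) => ((s - 1 : Nat) : Int) - (k : Int)) := by
      apply List.map_congr_left
      intro k hk
      simp only [Function.comp]
      have hk2 := List.mem_range.mp hk
      have h1 : 1 ≤ s := by omega
      push_cast [h1]
      ring
    rw [hmap, ih (s - 1) _ (by omega)]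
    simp only [Nat.cast_zero, sub_zero, sweepD]
    norm_num [PySem.List.pyGetD_natCast]

-- B's second pyRange sweep records the successive sweepD states
theorem foldl_sweep2 (cyl : List Int) :
    ∀ (t s : Nat) (d : Int) (acc : List Int), t ≤ s + 1 →
      (((List.range t).map (fun (k : Nat) => (s : Int) - (k : Int))).foldl
        (fun (p : Int × List Int) i =>
          let d' := if PySem.List.pyGetD cyl i 0 == 1 then 0 else p.1 + 1
          (d', p.2 ++ [d'])) (d, acc)).2
      = acc ++ (List.range t).map (fun (k : Nat) => sweepD cyl s (k + 1) d) := by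
  intro t
  induction t with
  | zero => intro s d acc _; simp
  | succ t ih =>
    intro s d acc ht
    rw [List.range_succ_eq_map]
    simp only [List.map_cons, List.map_map, List.foldl_cons]
    have hmap : (List.range t).map ((fun (k : Nat) => (s : Int) - (k : Int)) ∘ Nat.succ)
        = (List.range t).map (fun (k : Nat) => ((s - 1 : Nat) : Int) - (k : Int)) := by
      apply List.map_congr_left
      intro k hk
      simp only [Function.comp]
      have hk2 := List.mem_range.mp hk
      have h1 : 1 ≤ s := by omega
      push_cast [h1]
      ring
    rw [hmap]
    have hd' : (if PySem.List.pyGetD cyl ((s : Int) - (0 : Nat)) 0 == 1 then 0 else d + 1)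
        = (if cyl.getD s 0 == 1 then 0 else d + 1) := by
      norm_num [PySem.List.pyGetD_natCast]
    simp only [Nat.cast_zero, sub_zero] at hd' ⊢
    rw [hd', ih (s - 1) _ _ (by omega)]
    have hmap2 : (List.range t).map ((fun (k : Nat) => sweepD cyl s (k + 1) d) ∘ Nat.succ)
        = (List.range t).map (fun (k : Nat) => sweepD cyl (s - 1) (k + 1)
            (if cyl.getD s 0 == 1 then 0 else d + 1)) := by
      apply List.map_congr_left
      intro k _
      simp only [Function.comp]
      rfl
    rw [hmap2]
    simp [sweepD]

-- the Euclid loop computes Int.gcd on nonnegative inputs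
theorem bgcd_eq_gcd_aux : ∀ (fuel : Nat) (x y : Int), 0 ≤ x → 0 ≤ y → y.natAbs ≤ fuel →
    bgcd x y = Int.gcd x y := by
  intro fuel
  induction fuel with
  | zero =>
    intro x y hx hy hf
    have hy0 : y = 0 := by omega
    subst hy0
    rw [bgcd]
    simp [Int.gcd]
    exact (abs_of_nonneg hx).symm
  | succ fuel ih =>
    intro x y hx hy hf
    rw [bgcd]
    split_ifs with h
    · subst h
      simp [Int.gcd]
      exact (abs_of_nonneg hx).symm
    · have hypos : 0 < y := lt_of_le_of_ne hy (Ne.symm h)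
      have hm := PySem.Int.mod_nonneg x hypos
      have hlt := pv_mod_natAbs_lt x y h
      rw [ih y _ hy hm (by omega)]
      rw [PySem.Int.mod_eq_emod_of_pos hypos]
      rw [Int.gcd_comm, Int.gcd_emod]

-- A's descending divisor search hits the gcd first
theorem areduce_desc (mo ja : Int) (hja : 0 < ja) :
    ∀ (fuel : Nat) (c : Int), c ≤ fuel → ((Int.gcd mo ja : Int)) ≤ c →
      areduce mo ja (PySem.List.pyRange c 1 (-1))
        = (PySem.Int.floordiv mo (Int.gcd mo ja), PySem.Int.floordiv ja (Int.gcd mo ja)) := by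
  have hg1 : (1 : Int) ≤ (Int.gcd mo ja : Int) := by
    have : Int.gcd mo ja ≠ 0 := by
      intro h
      have := Int.eq_zero_of_gcd_eq_zero_right h
      omega
    omega
  have hgdm : ((Int.gcd mo ja : Int)) ∣ mo := Int.gcd_dvd_left mo ja
  have hgdj : ((Int.gcd mo ja : Int)) ∣ ja := Int.gcd_dvd_right mo ja
  intro fuel
  induction fuel with
  | zero => intro c hc hgc; exfalso; omega
  | succ fuel ih =>
    intro c hc hgc
    by_cases hc1 : c ≤ 1
    · have hg : (Int.gcd mo ja : Int) = 1 := by omega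
      rw [PySem.List.pyRange_neg_one_eq_nil hc1, hg]
      simp [areduce]
    · rw [PySem.List.pyRange_neg_one_cons (by omega : (1:Int) < c)]
      simp only [areduce]
      by_cases hdvd : ((c ∣ mo) ∧ (c ∣ ja))
      · have hcg : c ∣ ((Int.gcd mo ja : Int)) := Int.dvd_coe_gcd hdvd.1 hdvd.2
        have hcle : c ≤ (Int.gcd mo ja : Int) := Int.le_of_dvd (by omega) hcg
        have hceq : c = (Int.gcd mo ja : Int) := le_antisymm hcle hgc
        rw [if_pos]
        · rw [hceq]
        · simp only [Bool.and_eq_true, beq_iff_eq, PySem.Int.mod_eq_zero_iff_dvd]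
          exact hdvd
      · rw [if_neg]
        · apply ih (c - 1) (by omega)
          have : (Int.gcd mo ja : Int) ≠ c := by
            intro h
            exact hdvd ⟨h ▸ hgdm, h ▸ hgdj⟩
          omega
        · simp only [Bool.and_eq_true, beq_iff_eq, PySem.Int.mod_eq_zero_iff_dvd]
          tauto

-- A's reduction loop equals B's divide-by-gcd
theorem areduce_eq (mo ja : Int) (hja : 0 ≤ ja) (hmj : ja ≤ mo) :
    areduce mo ja (PySem.List.pyRange (min mo ja) 1 (-1))
      = (if ja > 0 then (PySem.Int.floordiv mo (bgcd mo ja), PySem.Int.floordiv ja (bgcd mo ja))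
         else (mo, ja)) := by
  by_cases hj : 0 < ja
  · rw [if_pos hj]
    have hbg : bgcd mo ja = Int.gcd mo ja :=
      bgcd_eq_gcd_aux ja.natAbs mo ja (by omega) hja (le_refl _)
    have hgle : ((Int.gcd mo ja : Int)) ≤ ja := Int.le_of_dvd hj (Int.gcd_dvd_right mo ja)
    have hmin : min mo ja = ja := min_eq_right hmj
    rw [hmin, hbg]
    exact areduce_desc mo ja hj ja.toNat ja (by omega) (by omega)
  · have hj0 : ja = 0 := by omega
    subst hj0
    rw [if_neg hj]
    have hmin : min mo (0:Int) = 0 := min_eq_right (by omega)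
    rw [hmin, PySem.List.pyRange_neg_one_eq_nil (by norm_num)]
    rfl

-- named pieces of B's computation (proof bookkeeping only)
def pvD1 (cyl : List Int) : Int :=
  sweepD cyl (cyl.length - 1) cyl.length (2 * (cyl.length : Int))

def pvDistRev (cyl : List Int) : List Int :=
  (List.range cyl.length).map (fun (k : Nat) => sweepD cyl (cyl.length - 1) (k + 1) (pvD1 cyl))

def pvStep (cyl : List Int) (a : Int) (q : Int × Int) (i : Int) : Int × Int :=
  if PySem.List.pyGetD cyl i 0 == 0 then
    (q.1 + 1,
     if PySem.List.pyGetD (pvDistRev cyl) ((cyl.length : Int) - 1 - i) 0 >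
         min a (cyl.length : Int) then q.2 + 1 else q.2)
  else q

def pvQ (cyl : List Int) (a : Int) : Int × Int :=
  (PySem.List.pyRange 0 (cyl.length : Int) 1).foldl (pvStep cyl a) (0, 0)

-- both counts stay nonnegative with ja ≤ mo
theorem pvQ_inv (cyl : List Int) (a : Int) :
    ∀ (l : List Int) (p : Int × Int), 0 ≤ p.2 → p.2 ≤ p.1 →
      0 ≤ (l.foldl (pvStep cyl a) p).2 ∧
      (l.foldl (pvStep cyl a) p).2 ≤ (l.foldl (pvStep cyl a) p).1 := by
  intro l
  induction l with
  | nil => intro p h1 h2; exact ⟨h1, h2⟩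
  | cons x xs ih =>
    intro p h1 h2
    simp only [List.foldl_cons]
    apply ih
    · unfold pvStep
      split_ifs <;> (try dsimp only) <;> omega
    · unfold pvStep
      split_ifs <;> (try dsimp only) <;> omega

-- B's value is its pvQ form
theorem solution_alt_eq_pvQ (cyl : List Int) (a : Int) (hn : 0 < cyl.length) :
    solution_alt cyl a =
      [(if (pvQ cyl a).2 > 0 then
          (PySem.Int.floordiv (pvQ cyl a).1 (bgcd (pvQ cyl a).1 (pvQ cyl a).2),
           PySem.Int.floordiv (pvQ cyl a).2 (bgcd (pvQ cyl a).1 (pvQ cyl a).2))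
        else ((pvQ cyl a).1, (pvQ cyl a).2)).2,
       (if (pvQ cyl a).2 > 0 then
          (PySem.Int.floordiv (pvQ cyl a).1 (bgcd (pvQ cyl a).1 (pvQ cyl a).2),
           PySem.Int.floordiv (pvQ cyl a).2 (bgcd (pvQ cyl a).1 (pvQ cyl a).2))
        else ((pvQ cyl a).1, (pvQ cyl a).2)).1] := by
  simp only [solution_alt]
  have hcnt : (((cyl.length : Int)) - 1 - (-1)).toNat = cyl.length := by omega
  have hrange : PySem.List.pyRange ((cyl.length : Int) - 1) (-1) (-1)
      = (List.range cyl.length).map (fun (k : Nat) => ((cyl.length - 1 : Nat) : Int) - (k : Int)) := by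
    rw [PySem.List.pyRange_neg_one, hcnt]
    apply List.map_congr_left
    intro k _
    have h1 : 1 ≤ cyl.length := hn
    push_cast [h1]
    ring
  rw [hrange]
  rw [foldl_sweep cyl cyl.length (cyl.length - 1) (2 * (cyl.length : Int)) (by omega)]
  rw [foldl_sweep2 cyl cyl.length (cyl.length - 1) _ [] (by omega)]
  simp only [List.nil_append]
  rfl

-- the two counting folds agree
theorem count_fold_eq (cyl : List Int) (a : Int) (hn : 0 < cyl.length) :
    ((PySem.List.pyRange 0 (cyl.length : Int) 1).filter
        (fun x => PySem.List.pyGetD cyl x 0 == 0)).foldl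
      (fun (p : Int × Int) idx =>
        if awhile cyl (cyl.length : Int) a idx 0 then (p.1 + 1, p.2)
        else (p.1 + 1, p.2 + 1)) (0, 0)
    = pvQ cyl a := by
  rw [List.foldl_filter]
  unfold pvQ
  apply PySem.List.foldl_congr_mem
  intro acc x hx
  rw [PySem.List.mem_pyRange_one] at hx
  obtain ⟨hx0, hxn⟩ := hx
  have hxi : x = (x.toNat : Int) := (Int.toNat_of_nonneg hx0).symm
  rw [hxi]
  set i := x.toNat with hi
  have hin : i < cyl.length := by omega
  unfold pvStep
  by_cases hz : (PySem.List.pyGetD cyl (i : Int) 0 == 0) = true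
  · rw [if_pos hz, if_pos hz]
    have h0 : ¬ pvBullet cyl i := by
      unfold pvBullet
      rw [PySem.List.pyGetD_natCast] at hz
      have := beq_iff_eq.mp hz
      omega
    have hidx : (cyl.length : Int) - 1 - (i : Int) = ((cyl.length - 1 - i : Nat) : Int) := by
      omega
    have hget : PySem.List.pyGetD (pvDistRev cyl) ((cyl.length : Int) - 1 - (i : Int)) 0
        = sweepD cyl (cyl.length - 1) (cyl.length - i) (pvD1 cyl) := by
      rw [hidx]
      unfold pvDistRev
      rw [PySem.List.pyGetD_natCast,
        PySem.List.getD_map_range _ _ _ _ (by omega)]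
      congr 1
      omega
    have e1 := awhile_iff cyl cyl.length hn a ((a - 0).toNat) i 0 hin rfl
    simp only [zero_add] at e1
    have e2 := period_reduce cyl cyl.length hn a i hin h0
    have e3 := dist_iff cyl cyl.length hn a i hin h0
    have hiff : (awhile cyl (cyl.length : Int) a (i : Int) 0 = true) ↔
        (sweepD cyl (cyl.length - 1) (cyl.length - i) (pvD1 cyl) ≤ min a (cyl.length : Int)) :=
      e1.trans (e2.trans e3.symm)
    rw [hget]
    by_cases hf : awhile cyl (cyl.length : Int) a (i : Int) 0 = true
    · rw [if_pos hf, if_neg (not_lt.mpr (hiff.mp hf))]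
    · rw [if_neg hf, if_pos (lt_of_not_ge (fun hle => hf (hiff.mpr hle)))]
  · rw [if_neg hz, if_neg hz]

theorem solution_eq (cylinder : List Int) (a : Int) :
    solution cylinder a = solution_alt cylinder a := by
  by_cases hnil : cylinder.length = 0
  · rw [List.length_eq_zero_iff] at hnil
    subst hnil
    rfl
  · have hn : 0 < cylinder.length := by omega
    rw [solution_alt_eq_pvQ cylinder a hn]
    simp only [solution]
    rw [count_fold_eq cylinder a hn]
    have hinv := pvQ_inv cylinder a
      (PySem.List.pyRange 0 (cylinder.length : Int) 1) (0, 0) (by norm_num) (by norm_num)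
    rw [areduce_eq (pvQ cylinder a).1 (pvQ cylinder a).2 hinv.1 hinv.2]

-- ===== VERDICT (by name: the statement is the Claim_ definition above) =====
theorem solution_spec : Claim_equal_solution := by
  intro cylinder a _
  unfold Spec_solution
  exact solution_eq cylinder a
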